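-- pv_equiv track=rewrite | github.com/adriancoronaa-prog/hr-management-system | backend/apps/empleados/services.py | obtener_dias_vacaciones_ley
-- ===== SOURCE A (Python) =====
-- VACACIONES_LFT = {
--     1: 12, 2: 14, 3: 16, 4: 18, 5: 20,
--     6: 22, 11: 24, 16: 26, 21: 28, 26: 30, 31: 32
-- }
--
-- def obtener_dias_vacaciones_ley(ano_antiguedad: int) -> int:
--     """Obtiene días de vacaciones según LFT para un año de antigüedad"""
--     if ano_antiguedad < 1:
--         return 0
--
--     dias = 12  # mínimo
--     for ano_limite, dias_correspondientes in sorted(VACACIONES_LFT.items()):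
--         if ano_antiguedad >= ano_limite:
--             dias = dias_correspondientes
--     return dias
-- ===== SOURCE B (Python) =====
-- def obtener_dias_vacaciones_ley(ano_antiguedad: int) -> int:
--     """Obtiene dias de vacaciones segun LFT, calculado en forma cerrada."""
--     if ano_antiguedad < 1:
--         return 0
--     if ano_antiguedad <= 6:
--         return 10 + 2 * ano_antiguedad
--     return min(32, 22 + 2 * ((ano_antiguedad - 6) // 5))
-- ===== Notes on version B (the rewrite author's own statement) =====
-- stated objective: simpler
-- what changed: Replaces the scan over the sorted VACACIONES_LFT table with a closed-form step function (linear 12..22 for years 1..6, then +2 every 5 years, capped at 32).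
import Mathlib
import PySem

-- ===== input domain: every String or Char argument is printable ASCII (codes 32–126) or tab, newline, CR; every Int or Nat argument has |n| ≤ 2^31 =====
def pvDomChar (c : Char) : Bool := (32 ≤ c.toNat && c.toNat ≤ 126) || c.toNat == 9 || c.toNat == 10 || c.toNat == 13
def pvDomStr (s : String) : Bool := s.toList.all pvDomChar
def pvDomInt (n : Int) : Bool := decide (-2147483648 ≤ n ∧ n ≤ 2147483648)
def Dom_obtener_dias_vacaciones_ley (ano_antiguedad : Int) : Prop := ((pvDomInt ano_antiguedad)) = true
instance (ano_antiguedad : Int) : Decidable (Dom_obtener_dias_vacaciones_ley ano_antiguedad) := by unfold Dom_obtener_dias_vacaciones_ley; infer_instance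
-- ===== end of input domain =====

-- B replaces A's scan over the sorted LFT table with a closed-form step function (objective: simpler).

-- ===== PORT A =====
def VACACIONES_LFT : PySem.Dict Int Int :=
  PySem.Dict.ofList [(1, 12), (2, 14), (3, 16), (4, 18), (5, 20),
                     (6, 22), (11, 24), (16, 26), (21, 28), (26, 30), (31, 32)]

def obtener_dias_vacaciones_ley (ano_antiguedad : Int) : Int :=
  if ano_antiguedad < 1 then 0
  else
    (PySem.List.sorted VACACIONES_LFT.items (fun p => p.1)).foldl
      (fun dias p => if ano_antiguedad ≥ p.1 then p.2 else dias) 12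

-- ===== PORT B =====
def obtener_dias_vacaciones_ley_alt (ano_antiguedad : Int) : Int :=
  if ano_antiguedad < 1 then 0
  else if ano_antiguedad ≤ 6 then 10 + 2 * ano_antiguedad
  else min 32 (22 + 2 * PySem.Int.floordiv (ano_antiguedad - 6) 5)

-- ===== PRECONDITION & SPEC =====
def Spec_obtener_dias_vacaciones_ley (ano_antiguedad : Int) (out : Int) : Prop := out = obtener_dias_vacaciones_ley_alt ano_antiguedad
instance (ano_antiguedad : Int) (out : Int) : Decidable (Spec_obtener_dias_vacaciones_ley ano_antiguedad out) := by unfold Spec_obtener_dias_vacaciones_ley; infer_instance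

-- ===== CLAIM (what is proved, stated in full; the proofs are below) =====
def Claim_equal_obtener_dias_vacaciones_ley : Prop := ∀ (ano_antiguedad : Int), Dom_obtener_dias_vacaciones_ley ano_antiguedad → Spec_obtener_dias_vacaciones_ley ano_antiguedad (obtener_dias_vacaciones_ley ano_antiguedad)

-- ===== LEMMAS AND PROOFS =====

-- ===== VERDICT (by name: the statement is the Claim_ definition above) =====
theorem obtener_dias_vacaciones_ley_spec : Claim_equal_obtener_dias_vacaciones_ley := by
  intro n _
  unfold Spec_obtener_dias_vacaciones_ley obtener_dias_vacaciones_ley obtener_dias_vacaciones_ley_alt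
  have hfd : PySem.Int.floordiv (n - 6) 5 = (n - 6) / 5 :=
    PySem.Int.floordiv_eq_ediv_of_pos (by omega)
  rw [show PySem.List.sorted VACACIONES_LFT.items (fun p => p.1) =
        [((1:Int),(12:Int)), (2, 14), (3, 16), (4, 18), (5, 20),
         (6, 22), (11, 24), (16, 26), (21, 28), (26, 30), (31, 32)] from by decide]
  by_cases h1 : n < 1
  · simp [h1]
  · by_cases h2 : 32 ≤ n
    · simp only [List.foldl, if_neg h1, hfd,
        show n ≥ 1 from by omega, show n ≥ 2 from by omega, show n ≥ 3 from by omega,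
        show n ≥ 4 from by omega, show n ≥ 5 from by omega, show n ≥ 6 from by omega,
        show n ≥ 11 from by omega, show n ≥ 16 from by omega, show n ≥ 21 from by omega,
        show n ≥ 26 from by omega, show n ≥ 31 from by omega, if_pos]
      omega
    · rw [hfd]
      interval_cases n <;> decide
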